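-- pv_equiv track=rewrite | github.com/arg-tech/py-aspic | pyaspic/set_preference.py | check_preference
-- ===== SOURCE A (Python) =====
-- def check_preference(set1, set2, element_preferences):
--
--     if len(set1) == 0:
--         return False
--
--     if len(set2) == 0:
--         return True
--
--     if element_preferences == []:
--         return True
--
--     for x in set1:
--         x = str(x)
--         for y in set2:
--             y = str(y)
--
--             if (x,y) in element_preferences:
--                 return True
--
--     return False
-- ===== SOURCE B (Python) =====
-- def check_preference(set1, set2, element_preferences):
--     if not set1:
--         return False
--     if not set2 or not element_preferences:
--         return True
--     s1 = {str(x) for x in set1}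
--     s2 = {str(y) for y in set2}
--     return _has_cross_pref(s1, s2, element_preferences)
--
--
-- def _has_cross_pref(s1, s2, prefs):
--     for p in prefs:
--         if isinstance(p, tuple) and len(p) == 2 and p[0] in s1 and p[1] in s2:
--             return True
--     return False
-- ===== Notes on version B (the rewrite author's own statement) =====
-- stated objective: faster
-- what changed: Instead of scanning element_preferences once per (x,y) pair of set1*set2, B builds two membership sets once and a helper makes a single pass over element_preferences, testing each pair against the two sets.
import Mathlib
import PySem

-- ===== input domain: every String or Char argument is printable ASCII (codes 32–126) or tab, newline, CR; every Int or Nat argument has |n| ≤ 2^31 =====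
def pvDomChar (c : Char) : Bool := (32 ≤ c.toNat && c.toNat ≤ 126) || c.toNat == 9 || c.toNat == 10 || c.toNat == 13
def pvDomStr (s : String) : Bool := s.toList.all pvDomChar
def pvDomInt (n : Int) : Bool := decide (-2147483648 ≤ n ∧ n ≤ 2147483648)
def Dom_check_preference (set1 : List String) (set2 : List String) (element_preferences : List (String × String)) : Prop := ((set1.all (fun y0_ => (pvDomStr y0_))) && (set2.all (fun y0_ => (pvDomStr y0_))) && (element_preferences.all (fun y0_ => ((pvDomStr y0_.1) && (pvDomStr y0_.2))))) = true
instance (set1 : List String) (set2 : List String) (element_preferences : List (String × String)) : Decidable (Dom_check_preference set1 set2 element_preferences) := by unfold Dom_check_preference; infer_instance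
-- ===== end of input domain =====

-- B replaces A's triple scan (set1 × set2 pairs, each scanning the preference list) by one pass of a
-- recursive helper over element_preferences against two precomputed membership sets — asymptotically faster.


-- ===== PORT A =====
def check_preference (set1 : List String) (set2 : List String) (element_preferences : List (String × String)) : Bool :=
  if set1.length = 0 then false
  else if set2.length = 0 then true
  else if element_preferences = [] then true
  else set1.any (fun x => set2.any (fun y => element_preferences.contains (x, y)))

-- ===== PORT B =====
-- helper loop of Source B, transcribed as structural recursion over the preference list;
-- the 'isinstance(p, tuple) and len(p) == 2' guard is always true under the typed signature
def hasCrossPref (s1 s2 : PySem.Set String) : List (String × String) → Bool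
  | [] => false
  | p :: ps => if PySem.Set.contains s1 p.1 && PySem.Set.contains s2 p.2 then true else hasCrossPref s1 s2 ps

def check_preference_alt (set1 : List String) (set2 : List String) (element_preferences : List (String × String)) : Bool :=
  if set1.isEmpty then false
  else if set2.isEmpty || element_preferences.isEmpty then true
  else hasCrossPref (PySem.Set.ofList set1) (PySem.Set.ofList set2) element_preferences

-- ===== PRECONDITION & SPEC =====
def Spec_check_preference (set1 : List String) (set2 : List String) (element_preferences : List (String × String)) (out : Bool) : Prop := out = check_preference_alt set1 set2 element_preferences
instance (set1 : List String) (set2 : List String) (element_preferences : List (String × String)) (out : Bool) : Decidable (Spec_check_preference set1 set2 element_preferences out) := by unfold Spec_check_preference; infer_instance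

-- ===== CLAIM (what is proved, stated in full; the proofs are below) =====
def Claim_equal_check_preference : Prop := ∀ (set1 : List String) (set2 : List String) (element_preferences : List (String × String)), Dom_check_preference set1 set2 element_preferences → Spec_check_preference set1 set2 element_preferences (check_preference set1 set2 element_preferences)

-- ===== LEMMAS AND PROOFS =====
theorem hasCrossPref_eq_any (s1 s2 : PySem.Set String) (ps : List (String × String)) :
    hasCrossPref s1 s2 ps = ps.any (fun p => PySem.Set.contains s1 p.1 && PySem.Set.contains s2 p.2) := by
  induction ps with
  | nil => rfl
  | cons p ps ih => by_cases h : (PySem.Set.contains s1 p.1 && PySem.Set.contains s2 p.2) = true <;> simp [hasCrossPref, ih, h]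

theorem any_swap (set1 set2 : List String) (eps : List (String × String)) :
    (set1.any (fun x => set2.any (fun y => eps.contains (x, y))))
      = eps.any (fun p => PySem.Set.contains (PySem.Set.ofList set1) p.1 &&
                          PySem.Set.contains (PySem.Set.ofList set2) p.2) := by
  rw [Bool.eq_iff_iff]
  simp only [List.any_eq_true, Bool.and_eq_true, PySem.Set.contains,
    List.contains_iff_mem, PySem.Set.mem_ofList]
  constructor
  · rintro ⟨x, hx, y, hy, hp⟩
    exact ⟨(x, y), hp, hx, hy⟩
  · rintro ⟨p, hp, h1, h2⟩
    exact ⟨p.1, h1, p.2, h2, hp⟩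

-- ===== VERDICT (by name: the statement is the Claim_ definition above) =====
theorem check_preference_spec : Claim_equal_check_preference := by
  intro set1 set2 eps _
  unfold Spec_check_preference check_preference check_preference_alt
  by_cases h1 : set1 = []
  · simp [h1]
  by_cases h2 : set2 = []
  · simp [h1, h2]
  by_cases h3 : eps = []
  · simp [h1, h2, h3]
  rw [if_neg (by simp [h1]), if_neg (by simp [h2]), if_neg h3,
      if_neg (by simp [h1]), if_neg (by simp [h2, h3]), hasCrossPref_eq_any]
  exact any_swap set1 set2 eps
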